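-- pv_equiv track=rewrite | github.com/fakhriyalfians/leetcode-solved | 2433-find-the-original-array-of-prefix-xor/2433-find-the-original-array-of-prefix-xor.py | findArray
-- ===== SOURCE A (Python) =====
-- from typing import List
--
-- def findArray(pref: List[int]) -> List[int]:
--     n = len(pref)
--     ans = [0] * n
--     x = 0
--     for i in range(n):
--         ans[i] = x ^ pref[i]
--         x ^= ans[i]
--     return ans
-- ===== SOURCE B (Python) =====
-- from typing import List
--
-- def findArray(pref: List[int]) -> List[int]:
--     if not pref:
--         return []
--     return [pref[0]] + [a ^ b for a, b in zip(pref, pref[1:])]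
-- ===== Notes on version B (the rewrite author's own statement) =====
-- stated objective: simpler
-- what changed: B drops A's running XOR accumulator and preallocated array: it returns the first prefix value followed by XORs of adjacent prefix pairs via zip, with no state threaded across iterations.
import Mathlib
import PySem

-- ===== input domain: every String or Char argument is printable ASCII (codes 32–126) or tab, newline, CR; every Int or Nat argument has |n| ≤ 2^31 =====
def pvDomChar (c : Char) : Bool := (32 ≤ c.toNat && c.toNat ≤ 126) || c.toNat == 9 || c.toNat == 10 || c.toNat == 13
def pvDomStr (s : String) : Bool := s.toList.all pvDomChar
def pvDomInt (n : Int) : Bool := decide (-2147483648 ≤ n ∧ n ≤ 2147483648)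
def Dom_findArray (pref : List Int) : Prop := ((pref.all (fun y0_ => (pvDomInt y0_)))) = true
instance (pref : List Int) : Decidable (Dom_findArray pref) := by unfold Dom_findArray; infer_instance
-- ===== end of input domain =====

-- B replaces A's running XOR accumulator with direct XORs of adjacent prefix pairs (simpler decomposition; same cost).

-- ===== PORT A =====
-- A's loop writes ans[i] = x ^ pref[i] then x ^= ans[i]; ported as structural recursion threading x.
def findArrayLoop (ps : List Int) (x : Int) : List Int :=
  match ps with
  | [] => []
  | p :: ps' =>
    let a := PySem.Int.bxor x p
    a :: findArrayLoop ps' (PySem.Int.bxor x a)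

def findArray (pref : List Int) : List Int := findArrayLoop pref 0

-- ===== PORT B =====
def findArray_alt (pref : List Int) : List Int :=
  match pref with
  | [] => []
  | p0 :: rest => p0 :: (pref.zip rest).map (fun ab => PySem.Int.bxor ab.1 ab.2)

-- ===== PRECONDITION & SPEC =====
def Spec_findArray (pref : List Int) (out : List Int) : Prop := out = findArray_alt pref
instance (pref : List Int) (out : List Int) : Decidable (Spec_findArray pref out) := by unfold Spec_findArray; infer_instance

-- ===== CLAIM (what is proved, stated in full; the proofs are below) =====
def Claim_equal_findArray : Prop := ∀ (pref : List Int), Dom_findArray pref → Spec_findArray pref (findArray pref)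

-- ===== LEMMAS AND PROOFS =====

theorem pv_nat_xor_cancel (a b : Nat) : a ^^^ (a ^^^ b) = b := by
  rw [← Nat.xor_assoc, Nat.xor_self, Nat.zero_xor]
theorem pv_bxor_cancel (x p : Int) : PySem.Int.bxor x (PySem.Int.bxor x p) = p := by
  unfold PySem.Int.bxor
  rcases le_or_gt (0:Int) x with hx0|hx0 <;> rcases le_or_gt (0:Int) p with hp0|hp0
  · have h1 : (0:Int) ≤ ↑(x.toNat ^^^ p.toNat) := Int.natCast_nonneg _
    simp only [if_pos hx0, if_pos hp0, if_pos h1, Int.toNat_natCast, pv_nat_xor_cancel]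
    omega
  · have hp : ¬ (0:Int) ≤ p := not_le.mpr hp0
    have h1 : ¬ (0:Int) ≤ -↑(x.toNat ^^^ (-p - 1).toNat) - 1 := by
      have := Int.natCast_nonneg (x.toNat ^^^ (-p - 1).toNat); omega
    simp only [if_pos hx0, if_neg hp, if_neg h1]
    have h2 : (-(-(↑(x.toNat ^^^ (-p - 1).toNat)) - 1) - 1) = ((x.toNat ^^^ (-p - 1).toNat : Nat) : Int) := by omega
    rw [h2, Int.toNat_natCast, pv_nat_xor_cancel]
    omega
  · have hxn : ¬ (0:Int) ≤ x := not_le.mpr hx0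
    have h1 : ¬ (0:Int) ≤ -↑((-x - 1).toNat ^^^ p.toNat) - 1 := by
      have := Int.natCast_nonneg ((-x - 1).toNat ^^^ p.toNat); omega
    simp only [if_neg hxn, if_pos hp0, if_neg h1]
    have h2 : (-(-(↑((-x - 1).toNat ^^^ p.toNat)) - 1) - 1) = (((-x - 1).toNat ^^^ p.toNat : Nat) : Int) := by omega
    rw [h2, Int.toNat_natCast, pv_nat_xor_cancel]
    omega
  · have hxn : ¬ (0:Int) ≤ x := not_le.mpr hx0
    have hp : ¬ (0:Int) ≤ p := not_le.mpr hp0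
    have h1 : (0:Int) ≤ ↑((-x - 1).toNat ^^^ (-p - 1).toNat) := Int.natCast_nonneg _
    simp only [if_neg hxn, if_neg hp, if_pos h1, Int.toNat_natCast, pv_nat_xor_cancel]
    omega

-- invariant: the loop run with accumulator x produces adjacent XORs of x :: ps
theorem findArrayLoop_eq (ps : List Int) (x : Int) :
    findArrayLoop ps x = ((x :: ps).zip ps).map (fun ab => PySem.Int.bxor ab.1 ab.2) := by
  induction ps generalizing x with
  | nil => rfl
  | cons p ps' ih =>
    simp only [findArrayLoop, List.zip, List.zipWith, List.map]
    rw [pv_bxor_cancel, ih]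
    rfl

-- ===== VERDICT (by name: the statement is the Claim_ definition above) =====
theorem findArray_spec : Claim_equal_findArray := by
  intro pref _
  unfold Spec_findArray findArray findArray_alt
  cases pref with
  | nil => rfl
  | cons p0 rest =>
    rw [findArrayLoop_eq]
    simp [List.zip, List.zipWith, PySem.Int.bxor_zero, PySem.Int.bxor_comm]
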